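-- pv_equiv track=rewrite | github.com/kj-arcanecoder/python-exercises | Beginner/temperature_tracker/utils.py | get_max_temp
-- ===== SOURCE A (Python) =====
-- def get_max_temp(temps, dates):
--     max_temp = temps[0]
--     max_date = dates[0]
--     for i in range(len(temps)):
--         if temps[i] > max_temp:
--             max_temp = temps[i]
--             max_date = dates[i]
--     return max_temp, max_date
-- ===== SOURCE B (Python) =====
-- def get_max_temp(temps, dates):
--     max_temp = max(temps)
--     return max_temp, dates[temps.index(max_temp)]
-- ===== Notes on version B (the rewrite author's own statement) =====
-- stated objective: simpler
-- what changed: Replaces the manual index-loop accumulator with a two-pass decomposition: max(temps) computes the maximum, then temps.index locates its first occurrence to pick the date; ties still resolve to the earliest index because both max and .index pick the first occurrence.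
import Mathlib
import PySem

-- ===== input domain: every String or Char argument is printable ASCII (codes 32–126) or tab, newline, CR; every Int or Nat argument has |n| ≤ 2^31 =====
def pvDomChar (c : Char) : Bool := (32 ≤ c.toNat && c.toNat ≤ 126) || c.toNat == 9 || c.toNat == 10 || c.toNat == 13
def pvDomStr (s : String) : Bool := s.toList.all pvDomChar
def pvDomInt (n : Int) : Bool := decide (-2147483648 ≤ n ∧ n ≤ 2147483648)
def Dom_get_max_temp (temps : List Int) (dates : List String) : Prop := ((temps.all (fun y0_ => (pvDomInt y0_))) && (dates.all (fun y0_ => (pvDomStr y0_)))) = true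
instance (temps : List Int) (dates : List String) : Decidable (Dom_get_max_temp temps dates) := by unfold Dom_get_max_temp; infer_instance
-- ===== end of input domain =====

-- B replaces A's manual accumulator loop with max(temps) + temps.index: simpler decomposition, same value.

-- ===== PORT A =====
def get_max_temp (temps : List Int) (dates : List String) : Int × String :=
  let max_temp := PySem.List.pyGetD temps 0 0        -- temps[0]; Pre_ excludes the IndexError
  let max_date := PySem.List.pyGetD dates 0 ""       -- dates[0]; Pre_ excludes the IndexError
  (PySem.List.pyRange 0 (temps.length : Int) 1).foldl
    (fun (s : Int × String) (i : Int) =>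
      if PySem.List.pyGetD temps i 0 > s.1 then
        (PySem.List.pyGetD temps i 0, PySem.List.pyGetD dates i "")   -- dates[i]; Pre_ excludes the IndexError
      else s)
    (max_temp, max_date)

-- ===== PORT B =====
def get_max_temp_alt (temps : List Int) (dates : List String) : Int × String :=
  let max_temp := (PySem.List.max? temps (fun x => x)).getD 0        -- max(temps); Pre_ excludes the ValueError on []
  (max_temp,
   PySem.List.pyGetD dates (((PySem.List.index? temps max_temp).getD 0 : Nat) : Int) "")  -- dates[temps.index(max_temp)]; Pre_ excludes the IndexError

-- ===== PRECONDITION & SPEC =====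
-- Pre_ is exactly where Python A returns: temps nonempty and the position of the first
-- maximum of temps (= the last index at which A reads dates) within dates' bounds.
def Pre_get_max_temp (temps : List Int) (dates : List String) : Prop :=
  temps ≠ [] ∧ List.idxOf (temps.foldl max (temps.headD 0)) temps < dates.length
instance (temps : List Int) (dates : List String) : Decidable (Pre_get_max_temp temps dates) := by
  unfold Pre_get_max_temp; infer_instance

def pvWitness_get_max_temp : List Int × List String := ([3, 7, 7, 2], ["mon", "tue", "wed", "thu"])

def Spec_get_max_temp (temps : List Int) (dates : List String) (out : Int × String) : Prop := out = get_max_temp_alt temps dates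
instance (temps : List Int) (dates : List String) (out : Int × String) : Decidable (Spec_get_max_temp temps dates out) := by unfold Spec_get_max_temp; infer_instance

-- ===== CLAIM (what is proved, stated in full; the proofs are below) =====
def Claim_equal_get_max_temp : Prop := ∀ (temps : List Int) (dates : List String), Dom_get_max_temp temps dates → Pre_get_max_temp temps dates → Spec_get_max_temp temps dates (get_max_temp temps dates)

-- ===== LEMMAS AND PROOFS =====

-- the loop body of A, named for the proofs (definitionally equal to the inline lambda)
def pvStep (temps : List Int) (dates : List String) (s : Int × String) (i : Int) : Int × String :=
  if PySem.List.pyGetD temps i 0 > s.1 then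
    (PySem.List.pyGetD temps i 0, PySem.List.pyGetD dates i "")
  else s

-- first occurrence of a fresh, strictly larger element appended at position m+1
lemma pv_index_succ (t x : Int) (ts : List Int) (m : Nat) (hm : m < ts.length)
    (hx : ts[m] = x) (hgt : (ts.take m).foldl max t < x) :
    PySem.List.index? (t :: ts) x = some (m + 1) := by
  rw [PySem.List.index?_eq_some_iff]
  refine ⟨t :: ts.take m, ts.drop (m + 1), ?_, ?_, ?_⟩
  · have hdrop : ts.drop m = x :: ts.drop (m + 1) := by
      rw [List.drop_eq_getElem_cons hm, hx]
    have hsplit : ts = ts.take m ++ x :: ts.drop (m + 1) := by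
      rw [← hdrop]; exact (List.take_append_drop m ts).symm
    rw [List.cons_append, ← hsplit]
  · simp [List.length_take_of_le (le_of_lt hm)]
  · intro hmem
    have hle2 := PySem.List.le_foldl_max (ts.take m) t
    rcases List.mem_cons.mp hmem with h | h
    · exact absurd (h ▸ hgt) (not_lt.mpr hle2.1)
    · exact absurd hgt (not_lt.mpr (hle2.2 x h))

-- loop invariant: after the first k iterations the state is the max of the length-k prefix
-- together with the date at its first occurrence
lemma pv_inv (t : Int) (ts : List Int) (dates : List String) :
    ∀ k : Nat, 1 ≤ k → k ≤ ts.length + 1 →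
    (PySem.List.pyRange 0 (k : Int) 1).foldl (pvStep (t :: ts) dates)
        (t, PySem.List.pyGetD dates 0 "")
    = ((ts.take (k - 1)).foldl max t,
       PySem.List.pyGetD dates
         (((PySem.List.index? (t :: ts) ((ts.take (k - 1)).foldl max t)).getD 0 : Nat) : Int) "") := by
  intro k
  induction k with
  | zero => intro h; omega
  | succ m ih =>
    intro _ hle
    cases m with
    | zero =>
      -- k = 1 : the loop body at i = 0 compares t with itself and keeps the state
      have h1 : PySem.List.pyRange 0 ((1 : Nat) : Int) 1 = [0] := by decide
      rw [h1]
      simp only [Nat.add_sub_cancel, List.take_zero, List.foldl_nil]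
      rw [PySem.List.index?_cons_self]
      simp [pvStep, PySem.List.pyGetD_ofNat']
    | succ m =>
      have hm : m < ts.length := by omega
      have hcast : ((m + 1 + 1 : Nat) : Int) = ((m + 1 : Nat) : Int) + 1 := by push_cast; ring
      rw [hcast, PySem.List.pyRange_one_succ_right (by positivity), List.foldl_append]
      rw [ih (by omega) (by omega)]
      simp only [Nat.add_sub_cancel]
      have hget : PySem.List.pyGetD (t :: ts) ((m + 1 : Nat) : Int) 0 = ts[m] := by
        rw [PySem.List.pyGetD_natCast]
        simp [List.getD, List.getElem?_eq_getElem hm]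
      have htake : ts.take (m + 1) = ts.take m ++ [ts[m]] := by
        rw [List.take_add_one]; simp [List.getElem?_eq_getElem hm]
      simp only [List.foldl_cons, List.foldl_nil, pvStep, hget]
      rw [htake, List.foldl_append]
      simp only [List.foldl_cons, List.foldl_nil]
      by_cases hc : ts[m] > (ts.take m).foldl max t
      · rw [if_pos hc, max_eq_right (le_of_lt hc)]
        rw [pv_index_succ t ts[m] ts m hm rfl hc]
        simp
      · rw [if_neg hc, max_eq_left (not_lt.mp hc)]

-- ===== VERDICT (by name: the statement is the Claim_ definition above) =====
theorem get_max_temp_spec : Claim_equal_get_max_temp := by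
  intro temps dates _ hpre
  obtain ⟨hne, -⟩ := hpre
  cases temps with
  | nil => exact absurd rfl hne
  | cons t ts =>
    show get_max_temp (t :: ts) dates = get_max_temp_alt (t :: ts) dates
    unfold get_max_temp get_max_temp_alt
    have hlen : (((t :: ts).length : Nat) : Int) = ((ts.length + 1 : Nat) : Int) := by simp
    rw [hlen]
    have hinit : PySem.List.pyGetD (t :: ts) 0 0 = t := by
      simp [PySem.List.pyGetD_ofNat']
    rw [hinit]
    have := pv_inv t ts dates (ts.length + 1) (by omega) (by omega)
    simp only [Nat.add_sub_cancel, List.take_length] at this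
    rw [show (fun (s : Int × String) (i : Int) =>
      if PySem.List.pyGetD (t :: ts) i 0 > s.1 then
        (PySem.List.pyGetD (t :: ts) i 0, PySem.List.pyGetD dates i "")
      else s) = pvStep (t :: ts) dates from rfl]
    rw [this]
    rw [PySem.List.max?_id_cons]
    rfl
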